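-- pv_equiv track=rewrite | github.com/aaronelledge/Ista131 | hw1.py | dups_dict
-- ===== SOURCE A (Python) =====
-- def dups_dict(d):
--     keys = []
--     for key in d:
--         for string in d[key]:
--             if string in keys:
--                 return True
--             else:
--                 keys.append(string)
--     return False
-- ===== SOURCE B (Python) =====
-- def dups_dict(d):
--     flat = [s for v in d.values() for s in v]
--     return len(flat) != len(set(flat))
-- ===== Notes on version B (the rewrite author's own statement) =====
-- stated objective: idiomatic
-- what changed: Replaces the incremental membership scan with early return by flattening all value lists once and comparing the flat list's length with its set's cardinality.
import Mathlib
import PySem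

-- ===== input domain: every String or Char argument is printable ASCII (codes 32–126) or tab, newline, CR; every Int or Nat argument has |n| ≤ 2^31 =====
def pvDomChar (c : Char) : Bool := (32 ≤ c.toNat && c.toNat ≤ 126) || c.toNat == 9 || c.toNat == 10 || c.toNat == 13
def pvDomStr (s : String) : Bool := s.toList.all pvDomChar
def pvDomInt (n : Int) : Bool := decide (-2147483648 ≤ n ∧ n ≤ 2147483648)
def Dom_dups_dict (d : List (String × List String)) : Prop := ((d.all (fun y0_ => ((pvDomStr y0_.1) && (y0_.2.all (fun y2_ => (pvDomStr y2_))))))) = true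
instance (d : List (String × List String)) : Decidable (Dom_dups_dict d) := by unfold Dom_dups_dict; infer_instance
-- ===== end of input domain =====

-- B flattens all value lists once and compares the flat list's length with its set's size,
-- replacing A's per-element membership scan with early return (objective: idiomatic).

-- ===== PORT A =====
-- inner loop `for string in d[key]: if string in keys: return True else: keys.append(string)`
-- none = early `return True`; some keys' = loop finished with updated keys
def dupsInner (keys : List String) (ss : List String) : Option (List String) :=
  match ss with
  | [] => some keys
  | s :: rest => if keys.contains s then none else dupsInner (keys ++ [s]) rest

-- outer loop `for key in d`: iterates the dict's entries in insertion order; `d[key]` is the entry's value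
def dupsOuter (keys : List String) (ps : List (String × List String)) : Bool :=
  match ps with
  | [] => false
  | (_, v) :: rest =>
    match dupsInner keys v with
    | none => true
    | some keys' => dupsOuter keys' rest

def dups_dict (d : List (String × List String)) : Bool :=
  dupsOuter [] d

-- ===== PORT B =====
def dups_dict_alt (d : List (String × List String)) : Bool :=
  let flat := d.flatMap (fun p => p.2)
  flat.length != (PySem.Set.ofList flat).length

-- ===== PRECONDITION & SPEC =====
def Spec_dups_dict (d : List (String × List String)) (out : Bool) : Prop := out = dups_dict_alt d
instance (d : List (String × List String)) (out : Bool) : Decidable (Spec_dups_dict d out) := by unfold Spec_dups_dict; infer_instance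

-- ===== CLAIM (what is proved, stated in full; the proofs are below) =====
def Claim_equal_dups_dict : Prop := ∀ (d : List (String × List String)), Dom_dups_dict d → Spec_dups_dict d (dups_dict d)

-- ===== LEMMAS AND PROOFS =====

lemma set_add_length_le (acc : List String) (x : String) :
    (PySem.Set.add acc x).length ≤ acc.length + 1 := by
  simp [PySem.Set.add]
  split_ifs <;> simp

lemma foldl_add_length_le (l acc : List String) :
    (l.foldl PySem.Set.add acc).length ≤ acc.length + l.length := by
  induction l generalizing acc with
  | nil => simp
  | cons x l ih =>
    rw [List.foldl_cons]
    have h1 := ih (PySem.Set.add acc x)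
    have h2 := set_add_length_le acc x
    simp only [List.length_cons]
    omega

lemma nodup_append_singleton {acc : List String} {x : String}
    (hacc : acc.Nodup) (hx : x ∉ acc) : (acc ++ [x]).Nodup := by
  rw [List.nodup_append_comm]
  simp [List.nodup_cons, hacc, hx]

lemma not_nodup_append_cons_of_mem {acc : List String} {x : String} (l : List String)
    (hx : x ∈ acc) : ¬ (acc ++ x :: l).Nodup := by
  intro h
  have h1 : (acc ++ [x]).Nodup :=
    h.sublist ((List.append_sublist_append_left acc).mpr (by simp))
  rw [List.nodup_append_comm] at h1
  simp [List.nodup_cons] at h1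
  exact h1.1 hx

lemma foldl_add_length_iff (l acc : List String) (hacc : acc.Nodup) :
    (l.foldl PySem.Set.add acc).length = acc.length + l.length ↔ (acc ++ l).Nodup := by
  induction l generalizing acc with
  | nil => simpa using hacc
  | cons x l ih =>
    rw [List.foldl_cons, List.append_cons]
    by_cases hx : x ∈ acc
    · have hadd : PySem.Set.add acc x = acc := by simp [PySem.Set.add, hx]
      rw [hadd]
      have hle := foldl_add_length_le l acc
      constructor
      · intro h
        exfalso
        simp only [List.length_cons] at h
        omega
      · intro h
        exfalso
        rw [← List.append_cons] at h
        exact not_nodup_append_cons_of_mem l hx h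
    · have hadd : PySem.Set.add acc x = acc ++ [x] := by simp [PySem.Set.add, hx]
      rw [hadd]
      have hacc' : (acc ++ [x]).Nodup := nodup_append_singleton hacc hx
      have hih := ih (acc ++ [x]) hacc'
      constructor
      · intro h
        apply hih.mp
        simp only [List.length_cons] at h
        simp only [List.length_append, List.length_cons, List.length_nil]
        omega
      · intro h
        have h2 := hih.mpr h
        simp only [List.length_append, List.length_cons, List.length_nil] at h2
        simp only [List.length_cons]
        omega

lemma ofList_length_iff (l : List String) :
    ((PySem.Set.ofList l).length = l.length) ↔ l.Nodup := by
  have h := foldl_add_length_iff l [] List.nodup_nil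
  simpa [PySem.Set.ofList_eq_foldl] using h

lemma dupsInner_eq (ss keys : List String) (hk : keys.Nodup) :
    dupsInner keys ss = if (keys ++ ss).Nodup then some (keys ++ ss) else none := by
  induction ss generalizing keys with
  | nil => simp [dupsInner, hk]
  | cons s ss ih =>
    by_cases hs : s ∈ keys
    · have hc : keys.contains s = true := by simpa using hs
      simp only [dupsInner, hc, if_true]
      rw [if_neg (not_nodup_append_cons_of_mem ss hs)]
    · have hc : keys.contains s = false := by simpa using hs
      have hk' : (keys ++ [s]).Nodup := nodup_append_singleton hk hs
      simp only [dupsInner, hc, Bool.false_eq_true, if_false]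
      rw [ih _ hk']
      have he : keys ++ [s] ++ ss = keys ++ s :: ss := by simp
      rw [he]

lemma dupsOuter_eq (ps : List (String × List String)) (keys : List String) (hk : keys.Nodup) :
    dupsOuter keys ps = !((keys ++ ps.flatMap (fun p => p.2)).Nodup : Bool) := by
  induction ps generalizing keys with
  | nil => simp [dupsOuter, hk]
  | cons p ps ih =>
    obtain ⟨k, v⟩ := p
    simp only [dupsOuter]
    rw [dupsInner_eq v keys hk]
    by_cases h : (keys ++ v).Nodup
    · rw [if_pos h]
      show dupsOuter (keys ++ v) ps = _
      rw [ih _ h]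
      simp [List.flatMap_cons, List.append_assoc]
    · rw [if_neg h]
      have hbig : ¬ (keys ++ List.flatMap (fun p => p.2) ((k, v) :: ps)).Nodup := by
        intro hnd
        apply h
        rw [List.flatMap_cons] at hnd
        exact hnd.sublist
          ((List.append_sublist_append_left keys).mpr (List.sublist_append_left v _))
      rw [List.flatMap_cons] at hbig
      simp [hbig]

-- ===== VERDICT (by name: the statement is the Claim_ definition above) =====
theorem dups_dict_spec : Claim_equal_dups_dict := by
  intro d _
  unfold Spec_dups_dict dups_dict dups_dict_alt
  rw [dupsOuter_eq d [] List.nodup_nil]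
  simp only [List.nil_append]
  set flat := d.flatMap (fun p => p.2) with hflat
  have hiff := ofList_length_iff flat
  by_cases h : flat.Nodup
  · simp [h, hiff.mpr h]
  · have hne : flat.length ≠ (PySem.Set.ofList flat).length :=
      fun e => h (hiff.mp e.symm)
    simp [h, hne]
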